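-- pv_equiv track=rewrite | github.com/Anuj-negi2207/Codeforces-Competition-Questions- | F_Dasha_and_Nightmares.py | process
-- ===== SOURCE A (Python) =====
-- def process(arr, n = 1):
--     #defaultdict consumes more time
--     C = [{} for i in range(26)]
--     mask = (1<<26) - 1
--     ans = 0
--
--     for s in arr:
--         D = [0]*26
--         for ch in s:
--             D[ord(ch)-97] += 1
--
--         curr = 0
--         for i in range(26):
--             if D[i]%2:          #IF character is odd
--                 curr |= (1<<i)
--
--         for i in range(26):
--             if D[i]==0:
--                 ans += C[i].get(mask^(1<<i)^curr, 0)   #Odd length and 25 unique characters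
--
--         for i in range(26):
--             if D[i]==0:
--                 C[i][curr] = C[i].get(curr, 0) + 1
--
--     return ans
-- ===== SOURCE B (Python) =====
-- def process(arr, n=1):
--     mask = (1 << 26) - 1
--     # pass 0: one signature per string: (seen letters bitmask, odd-count letters bitmask)
--     sigs = []
--     for s in arr:
--         seen = 0
--         curr = 0
--         for ch in s:
--             b = 1 << (ord(ch) - 97)
--             seen |= b
--             curr ^= b
--         sigs.append((seen, curr))
--     # pass 1: for every missing letter i of every string, tally its parity mask
--     C = [{} for _ in range(26)]
--     for seen, curr in sigs:
--         for i in range(26):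
--             if not (seen >> i) & 1:
--                 C[i][curr] = C[i].get(curr, 0) + 1
--     # pass 2: count ordered matching pairs; each valid unordered pair is seen
--     # exactly twice and no string matches itself, so halve at the end
--     total = 0
--     for seen, curr in sigs:
--         for i in range(26):
--             if not (seen >> i) & 1:
--                 total += C[i].get(mask ^ (1 << i) ^ curr, 0)
--     return total // 2
-- ===== Notes on version B (the rewrite author's own statement) =====
-- stated objective: alternative
-- what changed: B replaces A's online single pass (count array + parity loop + dict lookups interleaved with dict updates) by three separate passes: XOR/OR bitmask signatures per string, a fully built table, then a symmetric ordered-pair count halved at the end (no string can match itself, so //2 is exact).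
-- outside the precondition, e.g. on process(['`'], 1): A returns 0, B raises ValueError; on process(['G'], 1): A returns 0, B raises ValueError
import Mathlib
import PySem

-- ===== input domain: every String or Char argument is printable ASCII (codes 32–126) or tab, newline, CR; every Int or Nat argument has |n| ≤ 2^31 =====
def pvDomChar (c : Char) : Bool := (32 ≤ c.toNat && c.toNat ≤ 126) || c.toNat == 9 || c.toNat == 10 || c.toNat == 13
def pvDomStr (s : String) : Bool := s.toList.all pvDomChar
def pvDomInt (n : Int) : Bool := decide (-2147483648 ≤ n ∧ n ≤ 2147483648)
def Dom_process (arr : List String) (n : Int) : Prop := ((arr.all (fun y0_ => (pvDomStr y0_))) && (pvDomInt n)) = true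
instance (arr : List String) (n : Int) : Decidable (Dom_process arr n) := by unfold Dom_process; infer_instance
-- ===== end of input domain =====

-- B replaces A's online one-pass count/lookup/update loop by three passes (bitmask
-- signatures, full table build, symmetric ordered-pair count halved); same cost class.

-- Python's a << k, exact for 0 ≤ k (Python raises ValueError for k < 0; such shifts are excluded by Pre_)
def pyShl (a : Int) (k : Int) : Int := a <<< k.toNat
-- Python's a >> k for 0 ≤ k (only used with k from range(26))
def pyShr (a : Int) (k : Int) : Int := a >>> k.toNat

-- ===== PORT A =====
def process (arr : List String) (n : Int) : Int :=
  -- C = [{} for i in range(26)]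
  let C0 : List (PySem.Dict Int Int) := (PySem.List.pyRange 0 26 1).map (fun _ => PySem.Dict.empty)
  let mask : Int := (1 <<< 26) - 1
  let st := arr.foldl (fun (st : List (PySem.Dict Int Int) × Int) s =>
    let C := st.1
    let ans := st.2
    -- D = [0]*26 ; for ch in s: D[ord(ch)-97] += 1   (pyGetD/pySetD keep Python's
    -- negative-index wrap; the IndexError cases are excluded by Pre_)
    let D : List Int := s.toList.foldl (fun D ch =>
      let idx : Int := (ch.toNat : Int) - 97
      PySem.List.pySetD D idx (PySem.List.pyGetD D idx 0 + 1)) (List.replicate 26 0)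
    -- curr = OR of 1<<i over letters with odd count
    let curr : Int := (PySem.List.pyRange 0 26 1).foldl (fun curr i =>
      if PySem.Int.mod (PySem.List.pyGetD D i 0) 2 ≠ 0 then PySem.Int.bor curr (pyShl 1 i) else curr) 0
    -- ans += C[i].get(mask^(1<<i)^curr, 0) for each absent letter i
    let ans := (PySem.List.pyRange 0 26 1).foldl (fun ans i =>
      if PySem.List.pyGetD D i 0 = 0 then
        ans + (PySem.List.pyGetD C i PySem.Dict.empty).getD (PySem.Int.bxor (PySem.Int.bxor mask (pyShl 1 i)) curr) 0
      else ans) ans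
    -- C[i][curr] = C[i].get(curr, 0) + 1 for each absent letter i
    let C := (PySem.List.pyRange 0 26 1).foldl (fun C i =>
      if PySem.List.pyGetD D i 0 = 0 then
        PySem.List.pySetD C i ((PySem.List.pyGetD C i PySem.Dict.empty).insert curr ((PySem.List.pyGetD C i PySem.Dict.empty).getD curr 0 + 1))
      else C) C
    (C, ans)) (C0, 0)
  st.2

-- ===== PORT B =====
def process_alt (arr : List String) (n : Int) : Int :=
  let mask : Int := (1 <<< 26) - 1
  -- pass 0: (seen, curr) bitmask signature of every string
  let sigs : List (Int × Int) := arr.foldl (fun sigs s =>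
    let p := s.toList.foldl (fun (p : Int × Int) ch =>
      let b := pyShl 1 ((ch.toNat : Int) - 97)
      (PySem.Int.bor p.1 b, PySem.Int.bxor p.2 b)) (0, 0)
    sigs ++ [p]) []
  -- pass 1: build the full table C
  let C0 : List (PySem.Dict Int Int) := (PySem.List.pyRange 0 26 1).map (fun _ => PySem.Dict.empty)
  let C := sigs.foldl (fun C p =>
    (PySem.List.pyRange 0 26 1).foldl (fun C i =>
      if PySem.Int.band (pyShr p.1 i) 1 = 0 then
        PySem.List.pySetD C i ((PySem.List.pyGetD C i PySem.Dict.empty).insert p.2 ((PySem.List.pyGetD C i PySem.Dict.empty).getD p.2 0 + 1))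
      else C) C) C0
  -- pass 2: count ordered matching pairs, then halve
  let total : Int := sigs.foldl (fun total p =>
    (PySem.List.pyRange 0 26 1).foldl (fun total i =>
      if PySem.Int.band (pyShr p.1 i) 1 = 0 then
        total + (PySem.List.pyGetD C i PySem.Dict.empty).getD (PySem.Int.bxor (PySem.Int.bxor mask (pyShl 1 i)) p.2) 0
      else total) total) 0
  PySem.Int.floordiv total 2

-- ===== PRECONDITION & SPEC =====
-- Pre_ restricts to strings of lowercase letters a-z, the function's natural domain: on any
-- other character A either raises IndexError (ord outside 71..122) or, for ord 71..96, returns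
-- via Python's negative-index wraparound while B raises ValueError on the negative shift count.
def Pre_process (arr : List String) (n : Int) : Prop :=
  (arr.all (fun s => s.toList.all (fun c => 97 ≤ c.toNat && c.toNat ≤ 122))) = true
instance (arr : List String) (n : Int) : Decidable (Pre_process arr n) := by unfold Pre_process; infer_instance

def pvWitness_process : List String × Int := (["abcdefghijklmnopqrstuvwxy", "abcdefghijklmnopqrstuvwxy", "z"], 1)

def Spec_process (arr : List String) (n : Int) (out : Int) : Prop := out = process_alt arr n
instance (arr : List String) (n : Int) (out : Int) : Decidable (Spec_process arr n out) := by unfold Spec_process; infer_instance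

-- ===== CLAIM (what is proved, stated in full; the proofs are below) =====
def Claim_equal_process : Prop := ∀ (arr : List String) (n : Int), Dom_process arr n → Pre_process arr n → Spec_process arr n (process arr n)

-- ===== LEMMAS AND PROOFS =====

-- ---- proof-layer copies of the two ports' loop bodies (used to name the folds) ----

def currA (D : List Int) : Int :=
  (PySem.List.pyRange 0 26 1).foldl (fun curr i =>
    if PySem.Int.mod (PySem.List.pyGetD D i 0) 2 ≠ 0 then PySem.Int.bor curr (pyShl 1 i) else curr) 0

def ansA (C : List (PySem.Dict Int Int)) (D : List Int) (curr ans : Int) : Int :=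
  (PySem.List.pyRange 0 26 1).foldl (fun ans i =>
    if PySem.List.pyGetD D i 0 = 0 then
      ans + (PySem.List.pyGetD C i PySem.Dict.empty).getD (PySem.Int.bxor (PySem.Int.bxor ((1 <<< 26) - 1) (pyShl 1 i)) curr) 0
    else ans) ans

def updA (C : List (PySem.Dict Int Int)) (D : List Int) (curr : Int) : List (PySem.Dict Int Int) :=
  (PySem.List.pyRange 0 26 1).foldl (fun C i =>
    if PySem.List.pyGetD D i 0 = 0 then
      PySem.List.pySetD C i ((PySem.List.pyGetD C i PySem.Dict.empty).insert curr ((PySem.List.pyGetD C i PySem.Dict.empty).getD curr 0 + 1))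
    else C) C

def foldD (cs : List Char) (D0 : List Int) : List Int :=
  cs.foldl (fun D ch =>
    let idx : Int := (ch.toNat : Int) - 97
    PySem.List.pySetD D idx (PySem.List.pyGetD D idx 0 + 1)) D0

def stepAP (st : List (PySem.Dict Int Int) × Int) (s : String) : List (PySem.Dict Int Int) × Int :=
  let D := foldD s.toList (List.replicate 26 0)
  let curr := currA D
  (updA st.1 D curr, ansA st.1 D curr st.2)

def C0P : List (PySem.Dict Int Int) := (PySem.List.pyRange 0 26 1).map (fun _ => PySem.Dict.empty)

def sigFoldB (s : String) : Int × Int :=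
  s.toList.foldl (fun (p : Int × Int) ch =>
    let b := pyShl 1 ((ch.toNat : Int) - 97)
    (PySem.Int.bor p.1 b, PySem.Int.bxor p.2 b)) (0, 0)

def updBP (C : List (PySem.Dict Int Int)) (p : Int × Int) : List (PySem.Dict Int Int) :=
  (PySem.List.pyRange 0 26 1).foldl (fun C i =>
    if PySem.Int.band (pyShr p.1 i) 1 = 0 then
      PySem.List.pySetD C i ((PySem.List.pyGetD C i PySem.Dict.empty).insert p.2 ((PySem.List.pyGetD C i PySem.Dict.empty).getD p.2 0 + 1))
    else C) C

def addBP (C : List (PySem.Dict Int Int)) (total : Int) (p : Int × Int) : Int :=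
  (PySem.List.pyRange 0 26 1).foldl (fun total i =>
    if PySem.Int.band (pyShr p.1 i) 1 = 0 then
      total + (PySem.List.pyGetD C i PySem.Dict.empty).getD (PySem.Int.bxor (PySem.Int.bxor ((1 <<< 26) - 1) (pyShl 1 i)) p.2) 0
    else total) total

theorem process_unfold (arr : List String) (n : Int) :
    process arr n = (arr.foldl stepAP (C0P, 0)).2 := rfl

theorem alt_unfold (arr : List String) (n : Int) :
    process_alt arr n =
      PySem.Int.floordiv
        ((arr.foldl (fun sigs s => sigs ++ [sigFoldB s]) []).foldl
          (addBP ((arr.foldl (fun sigs s => sigs ++ [sigFoldB s]) []).foldl updBP C0P)) 0) 2 := rfl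

-- ---- abstract signatures ----

def lsig (cs : List Char) : Nat × Nat :=
  cs.foldl (fun p ch => (p.1 ||| (1 <<< (ch.toNat - 97)), p.2 ^^^ (1 <<< (ch.toNat - 97)))) (0, 0)

def sigS (s : String) : Nat × Nat := lsig s.toList

def cnt (cs : List Char) (i : Nat) : Nat := cs.countP (fun ch => ch.toNat - 97 == i)

def matchAt (x y : Nat × Nat) (i : Nat) : Bool :=
  !x.1.testBit i && !y.1.testBit i && (y.2 ^^^ x.2 == (2 ^ 26 - 1) ^^^ (1 <<< i))

def mcnt (y x : Nat × Nat) : Nat := (List.range 26).countP (fun i => matchAt x y i)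

def gsum (pre : List (Nat × Nat)) (x : Nat × Nat) : Nat := (pre.map (fun y => mcnt y x)).sum

def sumFrom : List (Nat × Nat) → List (Nat × Nat) → Nat
  | _, [] => 0
  | pre, x :: rest => gsum pre x + sumFrom (pre ++ [x]) rest

def sumPairs : List (Nat × Nat) → Nat
  | [] => 0
  | x :: xs => gsum xs x + sumPairs xs

def Lower (s : String) : Prop := ∀ c ∈ s.toList, 97 ≤ c.toNat ∧ c.toNat ≤ 122

def keyI (i : Nat) (x : Nat × Nat) : Int := (((2 ^ 26 - 1) ^^^ (1 <<< i) ^^^ x.2 : Nat) : Int)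

def RepC (C : List (PySem.Dict Int Int)) (pre : List (Nat × Nat)) : Prop :=
  C.length = 26 ∧ ∀ i : Nat, i < 26 → ∀ v : Int,
    (C.getD i PySem.Dict.empty).getD v 0 =
      ((pre.countP (fun y => !y.1.testBit i && ((y.2 : Int) == v)) : Nat) : Int)

def updC (C : List (PySem.Dict Int Int)) (x : Nat × Nat) : List (PySem.Dict Int Int) :=
  (List.range 26).foldl (fun C i =>
    if !x.1.testBit i then
      C.set i ((C.getD i PySem.Dict.empty).insert (x.2 : Int) ((C.getD i PySem.Dict.empty).getD (x.2 : Int) 0 + 1))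
    else C) C

def addL (C : List (PySem.Dict Int Int)) (x : Nat × Nat) (ans : Int) : Int :=
  (List.range 26).foldl (fun ans i =>
    if !x.1.testBit i then ans + (C.getD i PySem.Dict.empty).getD (keyI i x) 0 else ans) ans

-- ---- small generic lemmas ----

theorem sum_map_add {A : Type} (l : List A) (f g : A → Nat) :
    (l.map (fun x => f x + g x)).sum = (l.map f).sum + (l.map g).sum := by
  induction l with
  | nil => simp
  | cons a l ih => simp [ih]; omega

theorem sum_map_ite_one {A : Type} (l : List A) (p : A → Bool) :
    (l.map (fun x => if p x then 1 else 0)).sum = l.countP p := by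
  induction l with
  | nil => simp
  | cons a l ih => simp [List.countP_cons, ih]; by_cases h : p a <;> simp [h] <;> omega

theorem sum_map_natCast {A : Type} (l : List A) (f : A → Nat) :
    (l.map (fun x => ((f x : Nat) : Int))).sum = (((l.map f).sum : Nat) : Int) := by
  induction l with
  | nil => simp
  | cons a l ih => simp [ih]

theorem foldl_if_add {A : Type} (l : List A) (P : A → Bool) (f : A → Int) :
    ∀ a : Int, l.foldl (fun acc i => if P i then acc + f i else acc) a
      = a + (l.map (fun i => if P i then f i else 0)).sum := by
  induction l with
  | nil => simp
  | cons x l ih =>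
    intro a
    by_cases h : P x <;> simp [h, ih] <;> ring

theorem getD_set_eq {A : Type} (l : List A) (i : Nat) (v d : A) (j : Nat) :
    (l.set i v).getD j d = if i = j ∧ i < l.length then v else l.getD j d := by
  simp only [List.getD, List.getElem?_set]
  by_cases hij : i = j
  · subst hij
    by_cases hi : i < l.length
    · simp [hi]
    · simp [hi, List.getElem?_eq_none (by omega : l.length ≤ i)]
  · simp [hij]

theorem testBit_one_shl (i j : Nat) : ((1 : Nat) <<< i).testBit j = (i == j) := by
  rw [Nat.shiftLeft_eq, one_mul, Nat.testBit_two_pow]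
  exact (beq_eq_decide i j).symm

theorem beq_xor_shift (a b c : Nat) : (a == b ^^^ c) = (a ^^^ c == b) := by
  apply Bool.eq_iff_iff.mpr
  simp only [beq_iff_eq]
  constructor
  · intro h; subst h; exact Nat.xor_xor_cancel_right b c
  · intro h; subst h; simp [Nat.xor_assoc]

theorem band_shr_eq_zero_iff (m i : Nat) :
    (PySem.Int.band (pyShr (m : Int) (i : Nat)) 1 = 0) ↔ (m.testBit i = false) := by
  have h1 : pyShr (m : Int) (i : Nat) = ((m >>> i : Nat) : Int) := by simp [pyShr]
  have h2 : (1 : Int) = ((1 : Nat) : Int) := by norm_num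
  rw [h1, h2, PySem.Int.band_natCast]
  have : ((m >>> i) &&& 1 = 0) ↔ (m.testBit i = false) := by
    simp [Nat.testBit, Nat.and_one_is_mod]
  constructor
  · intro h; exact this.mp (by exact_mod_cast h)
  · intro h; exact_mod_cast this.mpr h

theorem pyrange26 : PySem.List.pyRange 0 26 1 = List.map (fun k => ((k : Nat) : Int)) (List.range 26) := by
  decide

-- ---- per-string facts ----

theorem lsig_fold_fst_testBit (cs : List Char) :
    ∀ (p : Nat × Nat) (j : Nat),
      ((cs.foldl (fun p ch => (p.1 ||| (1 <<< (ch.toNat - 97)), p.2 ^^^ (1 <<< (ch.toNat - 97)))) p).1).testBit j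
        = (p.1.testBit j || !(cnt cs j == 0)) := by
  induction cs with
  | nil => intro p j; simp [cnt]
  | cons ch cs ih =>
    intro p j
    rw [List.foldl_cons, ih, Nat.testBit_or, testBit_one_shl]
    have hc : cnt (ch :: cs) j = cnt cs j + (if (ch.toNat - 97 == j) then 1 else 0) := by
      simp [cnt, List.countP_cons]
    rw [hc]
    by_cases h : (ch.toNat - 97 == j)
    · simp [h]
    · simp [h]

theorem lsig_fold_snd_testBit (cs : List Char) :
    ∀ (p : Nat × Nat) (j : Nat),
      ((cs.foldl (fun p ch => (p.1 ||| (1 <<< (ch.toNat - 97)), p.2 ^^^ (1 <<< (ch.toNat - 97)))) p).2).testBit j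
        = (p.2.testBit j ^^ (cnt cs j % 2 == 1)) := by
  induction cs with
  | nil => intro p j; simp [cnt]
  | cons ch cs ih =>
    intro p j
    rw [List.foldl_cons, ih, Nat.testBit_xor, testBit_one_shl]
    have hc : cnt (ch :: cs) j = cnt cs j + (if (ch.toNat - 97 == j) then 1 else 0) := by
      simp [cnt, List.countP_cons]
    rw [hc]
    by_cases h : (ch.toNat - 97 == j)
    · simp only [h, if_true]
      have hflip : ((cnt cs j + 1) % 2 == 1) = !(cnt cs j % 2 == 1) := by
        rcases Nat.mod_two_eq_zero_or_one (cnt cs j) with h2 | h2 <;>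
          simp [Nat.add_mod, h2]
      rw [hflip]
      cases hb : p.2.testBit j <;> cases hq : (cnt cs j % 2 == 1) <;> simp [hb, hq]
    · simp [h]

theorem lsig_fst_testBit (cs : List Char) (j : Nat) :
    (lsig cs).1.testBit j = !(cnt cs j == 0) := by
  have := lsig_fold_fst_testBit cs (0, 0) j
  simpa [lsig] using this

theorem lsig_snd_testBit (cs : List Char) (j : Nat) :
    (lsig cs).2.testBit j = (cnt cs j % 2 == 1) := by
  have := lsig_fold_snd_testBit cs (0, 0) j
  simpa [lsig] using this

theorem cnt_of_ge_26 (cs : List Char) (h : ∀ c ∈ cs, 97 ≤ c.toNat ∧ c.toNat ≤ 122)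
    (j : Nat) (hj : 26 ≤ j) : cnt cs j = 0 := by
  rw [cnt, List.countP_eq_zero]
  intro c hc
  have := h c hc
  simp only [beq_iff_eq]
  omega

-- A's count array
theorem DA_aux (cs : List Char) :
    ∀ (D0 : List Int), (∀ c ∈ cs, 97 ≤ c.toNat ∧ c.toNat ≤ 122) → D0.length = 26 →
      (foldD cs D0).length = 26 ∧
      ∀ j : Nat, j < 26 → (foldD cs D0).getD j 0 = D0.getD j 0 + ((cnt cs j : Nat) : Int) := by
  induction cs with
  | nil => intro D0 _ hlen; simp [foldD, hlen, cnt]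
  | cons ch cs ih =>
    intro D0 h hlen
    have hch := h ch (by simp)
    have hidx : ((ch.toNat : Int) - 97) = ((ch.toNat - 97 : Nat) : Int) := by omega
    have hklt : ch.toNat - 97 < 26 := by omega
    have hstep : foldD (ch :: cs) D0
        = foldD cs (D0.set (ch.toNat - 97) (D0.getD (ch.toNat - 97) 0 + 1)) := by
      simp [foldD, hidx, PySem.List.pySetD_natCast, PySem.List.pyGetD_natCast]
    have ihr := ih (D0.set (ch.toNat - 97) (D0.getD (ch.toNat - 97) 0 + 1))
      (fun c hc => h c (by simp [hc])) (by simp [hlen])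
    refine ⟨by rw [hstep]; exact ihr.1, fun j hj => ?_⟩
    rw [hstep, ihr.2 j hj, getD_set_eq]
    by_cases hkj : ch.toNat - 97 = j
    · rw [if_pos ⟨hkj, by omega⟩]
      have hcc : cnt (ch :: cs) j = cnt cs j + 1 := by
        simp [cnt, List.countP_cons, hkj]
      rw [hcc, hkj]
      push_cast
      ring
    · rw [if_neg (by tauto)]
      have hcc : cnt (ch :: cs) j = cnt cs j := by
        simp [cnt, List.countP_cons, hkj]
      rw [hcc]

theorem DA_getD (cs : List Char) (h : ∀ c ∈ cs, 97 ≤ c.toNat ∧ c.toNat ≤ 122)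
    (j : Nat) (hj : j < 26) :
    PySem.List.pyGetD (foldD cs (List.replicate 26 0)) ((j : Nat) : Int) 0 = ((cnt cs j : Nat) : Int) := by
  have hres := DA_aux cs (List.replicate 26 0) h (by simp)
  rw [PySem.List.pyGetD_natCast, hres.2 j hj]
  rw [List.getD_replicate _ hj]
  ring

-- cast an or-accumulating Int fold down to Nat
theorem cast_or_fold (Q : Nat → Bool) :
    ∀ (l : List Nat) (a : Nat),
      l.foldl (fun c i => if Q i then PySem.Int.bor c (((1 <<< i : Nat) : Nat) : Int) else c) ((a : Nat) : Int)
        = ((l.foldl (fun c i => if Q i then c ||| (1 <<< i) else c) a : Nat) : Int) := by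
  intro l
  induction l with
  | nil => intro a; simp
  | cons x l ih =>
    intro a
    by_cases h : Q x
    · simp only [List.foldl_cons, h, if_true, PySem.Int.bor_natCast]
      exact ih (a ||| (1 <<< x))
    · simp only [List.foldl_cons, h, if_false]
      exact ih a

theorem or_fold_testBit (P : Nat → Bool) :
    ∀ (n a j : Nat),
      (((List.range n).foldl (fun c i => if P i then c ||| (1 <<< i) else c) a)).testBit j
        = (a.testBit j || (decide (j < n) && P j)) := by
  intro n
  induction n with
  | zero => intro a j; simp
  | succ n ih =>
    intro a j
    rw [List.range_succ, List.foldl_append]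
    simp only [List.foldl_cons, List.foldl_nil]
    by_cases hP : P n
    · rw [if_pos hP, Nat.testBit_or, ih, testBit_one_shl]
      by_cases hj : j = n
      · subst hj
        simp [hP, Nat.lt_succ_self, Nat.lt_irrefl]
      · have h1 : (n == j) = false := by simp [Ne.symm hj]
        rw [h1, Bool.or_false]
        have hiff : (j < n + 1) ↔ (j < n) := by omega
        simp only [hiff]
    · rw [if_neg hP, ih]
      by_cases hj : j = n
      · subst hj
        have h1 : (P j) = false := by simp [hP]
        simp [h1]
      · have hiff : (j < n + 1) ↔ (j < n) := by omega
        simp only [hiff]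

-- ---- canonical-loop lemmas ----

theorem matchAt_comm (x y : Nat × Nat) (i : Nat) : matchAt x y i = matchAt y x i := by
  cases hx : x.1.testBit i <;> cases hy : y.1.testBit i <;>
    simp [matchAt, hx, hy, Nat.xor_comm]

theorem mcnt_comm (x y : Nat × Nat) : mcnt y x = mcnt x y := by
  unfold mcnt
  exact List.countP_congr (fun i _ => by rw [matchAt_comm])

theorem mcnt_self (x : Nat × Nat) : mcnt x x = 0 := by
  rw [mcnt, List.countP_eq_zero]
  have hK : ∀ i ∈ List.range 26, ¬ (0 : Nat) = 67108863 ^^^ 1 <<< i := by decide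
  intro i hi
  simp only [matchAt, Nat.xor_self]
  simp
  intro _
  exact hK i hi

theorem gsum_append (pre : List (Nat × Nat)) (x y : Nat × Nat) :
    gsum (pre ++ [x]) y = gsum pre y + mcnt x y := by
  simp [gsum]

theorem gsum_cons (x : Nat × Nat) (xs : List (Nat × Nat)) (y : Nat × Nat) :
    gsum (x :: xs) y = mcnt x y + gsum xs y := by
  simp [gsum]

theorem sum_countP_eq_gsum (pre : List (Nat × Nat)) (x : Nat × Nat) :
    ((List.range 26).map (fun i => pre.countP (fun y => matchAt x y i))).sum = gsum pre x := by
  induction pre with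
  | nil => simp [gsum]
  | cons y pre ih =>
    have : (fun i => List.countP (fun z => matchAt x z i) (y :: pre))
        = fun i => List.countP (fun z => matchAt x z i) pre + (if matchAt x y i then 1 else 0) := by
      funext i; simp [List.countP_cons]
    rw [this, sum_map_add, ih, sum_map_ite_one, gsum_cons]
    have hm : List.countP (matchAt x y) (List.range 26) = mcnt y x := rfl
    rw [hm]
    omega

-- the generic distinct-position set loop
theorem foldl_set_getD {A : Type} (P : Nat → Bool) (F : Nat → A → A) (d : A) :
    ∀ (n : Nat) (C : List A), n ≤ C.length →
      (((List.range n).foldl (fun C i => if P i then C.set i (F i (C.getD i d)) else C) C).length = C.length ∧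
       ∀ j : Nat, ((List.range n).foldl (fun C i => if P i then C.set i (F i (C.getD i d)) else C) C).getD j d
          = if j < n ∧ P j then F j (C.getD j d) else C.getD j d) := by
  intro n
  induction n with
  | zero => intro C _; simp
  | succ n ih =>
    intro C hn
    have ihr := ih C (by omega)
    rw [List.range_succ, List.foldl_append]
    simp only [List.foldl_cons, List.foldl_nil]
    set Cn := (List.range n).foldl (fun C i => if P i then C.set i (F i (C.getD i d)) else C) C with hCn
    have hlen : Cn.length = C.length := ihr.1
    have hgd : ∀ j : Nat, Cn.getD j d = if j < n ∧ P j then F j (C.getD j d) else C.getD j d := ihr.2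
    have hCnn : Cn.getD n d = C.getD n d := by rw [hgd]; simp
    by_cases hP : P n
    · rw [if_pos hP]
      refine ⟨by simp [hlen], fun j => ?_⟩
      rw [getD_set_eq]
      by_cases hj : n = j
      · subst hj
        have hl : n < Cn.length := by omega
        rw [if_pos ⟨rfl, hl⟩, hCnn, if_pos ⟨by omega, hP⟩]
      · rw [if_neg (by tauto), hgd]
        have hiff : (j < n + 1) ↔ (j < n) := by omega
        simp only [hiff]
    · rw [if_neg hP]
      refine ⟨hlen, fun j => ?_⟩
      rw [hgd]
      by_cases hj : j = n
      · subst hj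
        have h1 : (P j) = false := by simp [hP]
        have h2 : ¬ (j < j) := by omega
        simp [h1, h2]
      · have hiff : (j < n + 1) ↔ (j < n) := by omega
        simp only [hiff]

theorem Rep_updC {C : List (PySem.Dict Int Int)} {pre : List (Nat × Nat)} (x : Nat × Nat)
    (hRep : RepC C pre) : RepC (updC C x) (pre ++ [x]) := by
  obtain ⟨hlen, hget⟩ := hRep
  have hfold := @foldl_set_getD (PySem.Dict Int Int) (fun i => !x.1.testBit i)
    (fun _ dct => dct.insert (x.2 : Int) (dct.getD (x.2 : Int) 0 + 1)) PySem.Dict.empty 26 C (by omega)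
  refine ⟨by rw [updC, hfold.1, hlen], fun i hi v => ?_⟩
  have hg : (updC C x).getD i PySem.Dict.empty
      = if i < 26 ∧ !x.1.testBit i then
          (C.getD i PySem.Dict.empty).insert (x.2 : Int) ((C.getD i PySem.Dict.empty).getD (x.2 : Int) 0 + 1)
        else C.getD i PySem.Dict.empty := by
    rw [updC]
    exact hfold.2 i
  rw [hg]
  rw [List.countP_append, List.countP_cons, List.countP_nil]
  by_cases hmiss : x.1.testBit i
  · have hcond : ¬ (i < 26 ∧ (!x.1.testBit i) = true) := by simp [hmiss]
    rw [if_neg hcond, hget i hi v]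
    simp [hmiss]
  · rw [if_pos ⟨hi, by simp [hmiss]⟩]
    rw [PySem.Dict.getD_insert]
    by_cases hv : v = (x.2 : Int)
    · subst hv
      rw [if_pos rfl, hget i hi]
      simp [hmiss]
    · rw [if_neg hv, hget i hi v]
      have hbe : ((x.2 : Int) == v) = false := by simp [Ne.symm hv]
      simp [hmiss, hbe]

theorem addL_eq {C : List (PySem.Dict Int Int)} {pre : List (Nat × Nat)} (x : Nat × Nat)
    (hRep : RepC C pre) (ans : Int) : addL C x ans = ans + ((gsum pre x : Nat) : Int) := by
  obtain ⟨hlen, hget⟩ := hRep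
  rw [addL, foldl_if_add (List.range 26) (fun i => !x.1.testBit i)
    (fun i => (C.getD i PySem.Dict.empty).getD (keyI i x) 0) ans]
  congr 1
  have hmap : (List.range 26).map (fun i => if !x.1.testBit i then (C.getD i PySem.Dict.empty).getD (keyI i x) 0 else 0)
      = (List.range 26).map (fun i => ((pre.countP (fun y => matchAt x y i) : Nat) : Int)) := by
    apply List.map_congr_left
    intro i hi
    have hi26 : i < 26 := List.mem_range.mp hi
    by_cases hmiss : x.1.testBit i
    · have hz : pre.countP (fun y => matchAt x y i) = 0 := by
        rw [List.countP_eq_zero]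
        intro y _
        simp [matchAt, hmiss]
      simp [hmiss, hz]
    · rw [if_pos (by simp [hmiss])]
      rw [hget i hi26 (keyI i x)]
      congr 1
      apply List.countP_congr
      intro y _
      have : ((y.2 : Int) == keyI i x) = (y.2 ^^^ x.2 == (2 ^ 26 - 1) ^^^ (1 <<< i)) := by
        rw [keyI]
        have : ((y.2 : Int) == (((2 ^ 26 - 1) ^^^ (1 <<< i) ^^^ x.2 : Nat) : Int)) = (y.2 == (2 ^ 26 - 1) ^^^ (1 <<< i) ^^^ x.2) := by
          simp [beq_iff_eq]
        rw [this, beq_xor_shift]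
      rw [this, matchAt]
      simp [hmiss]
    
  rw [hmap, sum_map_natCast (List.range 26) (fun i => pre.countP (fun y => matchAt x y i)),
    sum_countP_eq_gsum pre x]

-- ---- putting A together ----

theorem Rep_C0P : RepC C0P [] := by
  have hC0 : C0P = List.replicate 26 PySem.Dict.empty := by decide
  refine ⟨by simp [hC0], fun i hi v => ?_⟩
  rw [hC0]
  rw [List.getD_replicate _ hi]
  simp

theorem currA_eq (cs : List Char) (h : ∀ c ∈ cs, 97 ≤ c.toNat ∧ c.toNat ≤ 122) :
    currA (foldD cs (List.replicate 26 0)) = (((lsig cs).2 : Nat) : Int) := by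
  rw [currA, pyrange26, List.foldl_map]
  have hcong : ∀ (acc : Int), ∀ i ∈ List.range 26,
      (if PySem.Int.mod (PySem.List.pyGetD (foldD cs (List.replicate 26 0)) ((i : Nat) : Int) 0) 2 ≠ 0
        then PySem.Int.bor acc (pyShl 1 ((i : Nat) : Int)) else acc)
      = (if (cnt cs i % 2 == 1) then PySem.Int.bor acc (((1 <<< i : Nat) : Nat) : Int) else acc) := by
    intro acc i hi
    have hi26 := List.mem_range.mp hi
    rw [DA_getD cs h i hi26]
    have hmod : PySem.Int.mod ((cnt cs i : Nat) : Int) 2 = ((cnt cs i % 2 : Nat) : Int) := by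
      exact_mod_cast PySem.Int.mod_natCast (cnt cs i) 2
    have hshl : pyShl 1 ((i : Nat) : Int) = (((1 <<< i : Nat) : Nat) : Int) := by
      simp [pyShl]
    rw [hmod, hshl]
    by_cases hp : cnt cs i % 2 = 1
    · rw [if_pos (by simp [hp]), if_pos (by simp [hp])]
    · have h0 : cnt cs i % 2 = 0 := by omega
      rw [if_neg (by simp [h0]), if_neg (by simp [hp])]
  rw [PySem.List.foldl_congr_mem _ _ _ _ hcong]
  have h00 : ((0 : Nat) : Int) = (0 : Int) := by norm_num
  rw [← h00, cast_or_fold (fun i => cnt cs i % 2 == 1) (List.range 26) 0]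
  congr 1
  apply Nat.eq_of_testBit_eq
  intro j
  rw [or_fold_testBit, lsig_snd_testBit]
  by_cases hj : j < 26
  · simp [hj]
  · have hz : cnt cs j = 0 := cnt_of_ge_26 cs h j (by omega)
    simp [hj, hz]

theorem mask_cast : (((1 <<< 26 : Nat) : Int)) - 1 = (((2 ^ 26 - 1 : Nat) : Nat) : Int) := by decide

theorem key_cast (i : Nat) (x : Nat × Nat) :
    PySem.Int.bxor (PySem.Int.bxor (((1 <<< 26 : Nat) : Int) - 1) (((1 <<< i : Nat) : Nat) : Int)) ((x.2 : Nat) : Int)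
      = keyI i x := by
  rw [mask_cast, PySem.Int.bxor_natCast, PySem.Int.bxor_natCast, keyI]

theorem cond_iff (cs : List Char) (h : ∀ c ∈ cs, 97 ≤ c.toNat ∧ c.toNat ≤ 122)
    (i : Nat) (hi : i < 26) :
    (PySem.List.pyGetD (foldD cs (List.replicate 26 0)) ((i : Nat) : Int) 0 = 0)
      ↔ ((!(lsig cs).1.testBit i) = true) := by
  rw [DA_getD cs h i hi, lsig_fst_testBit]
  constructor
  · intro hz
    have : cnt cs i = 0 := by exact_mod_cast hz
    simp [this]
  · intro hb
    have : cnt cs i = 0 := by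
      by_contra hne
      simp [hne] at hb
    simp [this]

theorem ansA_eq (s : String) (hs : Lower s) (C : List (PySem.Dict Int Int)) (ans : Int) :
    ansA C (foldD s.toList (List.replicate 26 0)) (currA (foldD s.toList (List.replicate 26 0))) ans
      = addL C (sigS s) ans := by
  rw [ansA, pyrange26, List.foldl_map, currA_eq s.toList hs, addL]
  simp only [sigS]
  apply PySem.List.foldl_congr_mem
  intro acc i hi
  have hi26 := List.mem_range.mp hi
  have hshl : pyShl 1 ((i : Nat) : Int) = (((1 <<< i : Nat) : Nat) : Int) := by simp [pyShl]
  have hcond := cond_iff s.toList hs i hi26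
  by_cases hz : (!(lsig s.toList).1.testBit i) = true
  · rw [if_pos (hcond.mpr hz), if_pos hz, hshl, key_cast i (lsig s.toList), PySem.List.pyGetD_natCast]
  · rw [if_neg (fun hc => hz (hcond.mp hc)), if_neg hz]

theorem updA_eq (s : String) (hs : Lower s) (C : List (PySem.Dict Int Int)) :
    updA C (foldD s.toList (List.replicate 26 0)) (currA (foldD s.toList (List.replicate 26 0)))
      = updC C (sigS s) := by
  rw [updA, pyrange26, List.foldl_map, currA_eq s.toList hs, updC]
  simp only [sigS]
  apply PySem.List.foldl_congr_mem
  intro acc i hi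
  have hi26 := List.mem_range.mp hi
  have hcond := cond_iff s.toList hs i hi26
  by_cases hz : (!(lsig s.toList).1.testBit i) = true
  · rw [if_pos (hcond.mpr hz), if_pos hz, PySem.List.pySetD_natCast, PySem.List.pyGetD_natCast]
  · rw [if_neg (fun hc => hz (hcond.mp hc)), if_neg hz]

theorem stepAP_eq (s : String) (hs : Lower s) (C : List (PySem.Dict Int Int)) (ans : Int)
    (hlen : C.length = 26) :
    stepAP (C, ans) s = (updC C (sigS s), addL C (sigS s) ans) := by
  calc stepAP (C, ans) s
      = (updA C (foldD s.toList (List.replicate 26 0)) (currA (foldD s.toList (List.replicate 26 0))),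
         ansA C (foldD s.toList (List.replicate 26 0)) (currA (foldD s.toList (List.replicate 26 0))) ans) := rfl
    _ = (updC C (sigS s), addL C (sigS s) ans) := by
        rw [updA_eq s hs C, ansA_eq s hs C ans]

theorem foldA_inv (rest : List String) :
    ∀ (pre : List (Nat × Nat)) (C : List (PySem.Dict Int Int)) (ans : Nat),
      (∀ s ∈ rest, Lower s) → RepC C pre →
      (rest.foldl stepAP (C, ((ans : Nat) : Int))).2 = ((ans + sumFrom pre (rest.map sigS) : Nat) : Int) := by
  induction rest with
  | nil => intro pre C ans _ _; simp [sumFrom]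
  | cons s rest ih =>
    intro pre C ans hl hRep
    have hs : Lower s := hl s (by simp)
    rw [List.foldl_cons, stepAP_eq s hs C _ hRep.1]
    rw [addL_eq (sigS s) hRep]
    have : ((ans : Int) + ((gsum pre (sigS s) : Nat) : Int)) = (((ans + gsum pre (sigS s) : Nat) : Nat) : Int) := by
      push_cast; ring
    rw [this]
    rw [ih (pre ++ [sigS s]) (updC C (sigS s)) _ (fun t ht => hl t (by simp [ht])) (Rep_updC (sigS s) hRep)]
    simp [sumFrom]
    push_cast
    ring

-- ---- putting B together ----

theorem sigFoldB_aux (cs : List Char) (h : ∀ c ∈ cs, 97 ≤ c.toNat ∧ c.toNat ≤ 122) :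
    ∀ (a b : Nat),
      cs.foldl (fun (p : Int × Int) ch =>
        let bb := pyShl 1 ((ch.toNat : Int) - 97)
        (PySem.Int.bor p.1 bb, PySem.Int.bxor p.2 bb)) (((a : Nat) : Int), ((b : Nat) : Int))
      = ((((cs.foldl (fun p ch => (p.1 ||| (1 <<< (ch.toNat - 97)), p.2 ^^^ (1 <<< (ch.toNat - 97)))) (a, b)).1 : Nat) : Int),
         (((cs.foldl (fun p ch => (p.1 ||| (1 <<< (ch.toNat - 97)), p.2 ^^^ (1 <<< (ch.toNat - 97)))) (a, b)).2 : Nat) : Int)) := by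
  induction cs with
  | nil => intro a b; simp
  | cons ch cs ih =>
    intro a b
    have hch := h ch (by simp)
    have hsh : pyShl 1 ((ch.toNat : Int) - 97) = (((1 <<< (ch.toNat - 97) : Nat) : Nat) : Int) := by
      rw [pyShl]
      have ht : ((ch.toNat : Int) - 97).toNat = ch.toNat - 97 := by omega
      rw [ht]
      simp
    rw [List.foldl_cons, List.foldl_cons]
    dsimp only
    rw [hsh, PySem.Int.bor_natCast, PySem.Int.bxor_natCast]
    exact ih (fun c hc => h c (by simp [hc])) _ _

theorem sigFoldB_cast (s : String) (hs : Lower s) :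
    sigFoldB s = (((sigS s).1 : Int), ((sigS s).2 : Int)) := by
  have h0 : ((0 : Nat) : Int) = (0 : Int) := by norm_num
  have haux := sigFoldB_aux s.toList hs 0 0
  rw [h0] at haux
  rw [sigFoldB]
  exact haux

theorem condB_iff (m : Nat) (i : Nat) :
    (PySem.Int.band (pyShr ((m : Nat) : Int) ((i : Nat) : Int)) 1 = 0) ↔ ((!m.testBit i) = true) := by
  rw [band_shr_eq_zero_iff m i]
  simp

theorem updBP_cast (C : List (PySem.Dict Int Int)) (x : Nat × Nat) :
    updBP C ((x.1 : Int), (x.2 : Int)) = updC C x := by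
  rw [updBP, pyrange26, List.foldl_map, updC]
  dsimp only
  apply PySem.List.foldl_congr_mem
  intro acc i hi
  have hcond := condB_iff x.1 i
  by_cases hz : (!x.1.testBit i) = true
  · rw [if_pos (hcond.mpr hz), if_pos hz, PySem.List.pySetD_natCast, PySem.List.pyGetD_natCast]
  · rw [if_neg (fun hc => hz (hcond.mp hc)), if_neg hz]

theorem addBP_cast (C : List (PySem.Dict Int Int)) (t : Int) (x : Nat × Nat) :
    addBP C t ((x.1 : Int), (x.2 : Int)) = addL C x t := by
  rw [addBP, pyrange26, List.foldl_map, addL]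
  dsimp only
  apply PySem.List.foldl_congr_mem
  intro acc i hi
  have hcond := condB_iff x.1 i
  have hshl : pyShl 1 ((i : Nat) : Int) = (((1 <<< i : Nat) : Nat) : Int) := by simp [pyShl]
  by_cases hz : (!x.1.testBit i) = true
  · rw [if_pos (hcond.mpr hz), if_pos hz, hshl, key_cast i x, PySem.List.pyGetD_natCast]
  · rw [if_neg (fun hc => hz (hcond.mp hc)), if_neg hz]

theorem tableB_rep (l : List (Nat × Nat)) :
    ∀ (pre : List (Nat × Nat)) (C : List (PySem.Dict Int Int)), RepC C pre →
      RepC ((l.map (fun x => ((x.1 : Int), (x.2 : Int)))).foldl updBP C) (pre ++ l) := by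
  induction l with
  | nil => intro pre C h; simpa using h
  | cons x l ih =>
    intro pre C h
    rw [List.map_cons, List.foldl_cons, updBP_cast]
    have := ih (pre ++ [x]) (updC C x) (Rep_updC x h)
    simpa using this

theorem totalB_eq (C : List (PySem.Dict Int Int)) (σ : List (Nat × Nat)) (hRep : RepC C σ) :
    ∀ (l : List (Nat × Nat)) (a : Nat),
      ((l.map (fun x => ((x.1 : Int), (x.2 : Int)))).foldl (addBP C) ((a : Nat) : Int))
        = ((a + (l.map (fun x => gsum σ x)).sum : Nat) : Int) := by
  intro l
  induction l with
  | nil => intro a; simp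
  | cons x l ih =>
    intro a
    rw [List.map_cons, List.foldl_cons, addBP_cast, addL_eq x hRep]
    have h1 : ((a : Int) + ((gsum σ x : Nat) : Int)) = (((a + gsum σ x : Nat) : Nat) : Int) := by
      push_cast; ring
    rw [h1, ih (a + gsum σ x)]
    congr 1
    simp only [List.map_cons, List.sum_cons]
    omega

-- ---- the combinatorial core ----

theorem sumFrom_eq (l : List (Nat × Nat)) :
    ∀ pre : List (Nat × Nat), sumFrom pre l = (l.map (fun x => gsum pre x)).sum + sumPairs l := by
  induction l with
  | nil => intro pre; simp [sumFrom, sumPairs]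
  | cons x xs ih =>
    intro pre
    rw [sumFrom, ih (pre ++ [x])]
    have h1 : (xs.map (fun y => gsum (pre ++ [x]) y)).sum
        = (xs.map (fun y => gsum pre y)).sum + (xs.map (fun y => mcnt x y)).sum := by
      have : (fun y => gsum (pre ++ [x]) y) = fun y => gsum pre y + mcnt x y := by
        funext y; exact gsum_append pre x y
      rw [this, sum_map_add]
    have h2 : (xs.map (fun y => mcnt x y)).sum = gsum xs x := by
      rw [gsum]
      congr 1
      apply List.map_congr_left
      intro y _
      exact (mcnt_comm x y).symm
    rw [h1, h2]
    simp [sumPairs]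
    omega

theorem total_eq_twice (l : List (Nat × Nat)) :
    (l.map (fun x => gsum l x)).sum = 2 * sumPairs l := by
  induction l with
  | nil => simp [sumPairs]
  | cons x xs ih =>
    have hx : gsum (x :: xs) x = gsum xs x := by
      rw [gsum_cons, mcnt_self]; omega
    have hmap : (xs.map (fun y => gsum (x :: xs) y)).sum
        = (xs.map (fun y => mcnt x y)).sum + (xs.map (fun y => gsum xs y)).sum := by
      have : (fun y => gsum (x :: xs) y) = fun y => mcnt x y + gsum xs y := by
        funext y; exact gsum_cons x xs y
      rw [this, sum_map_add]
    have hsym : (xs.map (fun y => mcnt x y)).sum = gsum xs x := by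
      rw [gsum]
      congr 1
      exact List.map_congr_left (fun y _ => (mcnt_comm x y).symm)
    rw [List.map_cons, List.sum_cons, hx, hmap, hsym, ih, sumPairs]
    omega

-- ===== VERDICT (by name: the statement is the Claim_ definition above) =====
theorem process_spec : Claim_equal_process := by
  intro arr n _ hPre
  unfold Spec_process
  have hlow : ∀ s ∈ arr, Lower s := by
    intro s hsarr c hc
    unfold Pre_process at hPre
    rw [List.all_eq_true] at hPre
    have := hPre s hsarr
    rw [List.all_eq_true] at this
    have := this c hc
    simp at this
    omega
  -- A's side
  have hA : process arr n = ((sumPairs (arr.map sigS) : Nat) : Int) := by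
    rw [process_unfold arr n]
    have h0 : ((0 : Int)) = (((0 : Nat) : Nat) : Int) := by norm_num
    rw [h0, foldA_inv arr [] C0P 0 hlow Rep_C0P]
    have hsf : 0 + sumFrom [] (arr.map sigS) = sumPairs (arr.map sigS) := by
      rw [sumFrom_eq]
      have hz : ∀ l : List (Nat × Nat), (l.map (fun x => gsum [] x)).sum = 0 := by
        intro l; induction l <;> simp_all [gsum]
      have := hz (arr.map sigS)
      omega
    rw [hsf]
  -- B's side
  have hsigs : arr.foldl (fun sigs s => sigs ++ [sigFoldB s]) [] 
      = (arr.map sigS).map (fun x => ((x.1 : Int), (x.2 : Int))) := by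
    rw [PySem.List.foldl_append_singleton_eq_map]
    simp only [List.nil_append, List.map_map]
    apply List.map_congr_left
    intro s hsarr
    exact sigFoldB_cast s (hlow s hsarr)
  have hRepFull : RepC (((arr.map sigS).map (fun x => ((x.1 : Int), (x.2 : Int)))).foldl updBP C0P) (arr.map sigS) := by
    have := tableB_rep (arr.map sigS) [] C0P Rep_C0P
    simpa using this
  have hB : process_alt arr n = PySem.Int.floordiv (((2 * sumPairs (arr.map sigS) : Nat) : Int)) 2 := by
    rw [alt_unfold arr n, hsigs]
    have h0 : ((0 : Int)) = (((0 : Nat) : Nat) : Int) := by norm_num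
    rw [h0, totalB_eq _ (arr.map sigS) hRepFull (arr.map sigS) 0]
    rw [total_eq_twice]
    norm_num
  rw [hA, hB]
  rw [PySem.Int.floordiv_eq_ediv_of_pos (by norm_num)]
  push_cast
  omega
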